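-- pv_equiv track=rewrite | github.com/camwar11/AoC | src/2025/9/day9.py | part_1
-- ===== SOURCE A (Python) =====
-- def area(p1: tuple[int, int], p2: tuple[int, int]) -> int:
--     width = abs(p2[0] - p1[0]) + 1
--     height = abs(p2[1] - p1[1]) + 1
--     return width * height
--
-- def part_1(data: list[tuple[int, int]]) -> str | None:
--     areas: list[(int, tuple[int, int])] = []
--
--     for i, first in enumerate(data):
--         for j, second in enumerate(data):
--             if i >= j:
--                 continue
--             areas.append((area(first, second), (i, j)))
--         areas.sort(reverse=True)
--
--     return str(areas[0][0])
-- ===== SOURCE B (Python) =====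
-- def part_1(data: list[tuple[int, int]]) -> str | None:
--     best = None
--     for i, (x1, y1) in enumerate(data):
--         for x2, y2 in data[i + 1:]:
--             a = (abs(x2 - x1) + 1) * (abs(y2 - y1) + 1)
--             if best is None or a > best:
--                 best = a
--     return str(best)
-- ===== Notes on version B (the rewrite author's own statement) =====
-- stated objective: faster
-- what changed: A builds a list of all (area,(i,j)) pairs and re-sorts it after every outer iteration to take the head; B keeps a single running maximum of the pair areas in one nested pass with no list and no sorting.
import Mathlib
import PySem

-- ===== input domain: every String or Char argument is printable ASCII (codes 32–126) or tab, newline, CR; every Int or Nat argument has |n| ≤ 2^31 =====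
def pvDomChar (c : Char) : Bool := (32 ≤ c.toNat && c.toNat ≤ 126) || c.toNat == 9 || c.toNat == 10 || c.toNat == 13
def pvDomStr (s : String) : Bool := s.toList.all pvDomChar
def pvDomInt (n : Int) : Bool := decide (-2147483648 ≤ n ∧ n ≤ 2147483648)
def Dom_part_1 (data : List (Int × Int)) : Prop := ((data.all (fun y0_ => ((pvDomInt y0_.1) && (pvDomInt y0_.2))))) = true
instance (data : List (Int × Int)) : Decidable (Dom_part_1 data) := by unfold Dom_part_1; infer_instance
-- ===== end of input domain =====

-- B replaces A's "append all pairs, repeatedly re-sort, take the head" by a single running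
-- maximum over the pairs with no sorting and no list of candidates (objective: faster).

-- ===== PORT A =====
def pvArea (p1 p2 : Int × Int) : Int :=
  let width := |p2.1 - p1.1| + 1
  let height := |p2.2 - p1.2| + 1
  width * height

-- Python tuple comparison of (area, (i, j)) is lexicographic: rendered by this key into Lex order
def pvKey (t : Int × (Int × Int)) : Lex (Int × Lex (Int × Int)) := toLex (t.1, toLex t.2)

def part_1 (data : List (Int × Int)) : String :=
  let areas := (PySem.List.enumerate data).foldl (fun areas ij =>
    let areas := (PySem.List.enumerate data).foldl (fun acc kl =>
      if ij.1 ≥ kl.1 then acc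
      else acc ++ [(pvArea ij.2 kl.2, (ij.1, kl.1))]) areas
    PySem.List.sorted areas pvKey true) []
  match PySem.List.pyGet? areas 0 with
  | some t => PySem.Int.toStr t.1
  | none => ""  -- areas[0] raises IndexError here (fewer than 2 points); excluded by Pre_

-- ===== PORT B =====
def part_1_alt (data : List (Int × Int)) : String :=
  let best := (PySem.List.enumerate data).foldl (fun best ip =>
    (PySem.List.slice data (some (ip.1 + 1)) none).foldl (fun best q =>
      let a := (|q.1 - ip.2.1| + 1) * (|q.2 - ip.2.2| + 1)
      match best with
      | none => some a
      | some m => if a > m then some a else best) best) none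
  match best with
  | none => "None"   -- str(None)
  | some m => PySem.Int.toStr m

-- ===== PRECONDITION & SPEC =====
-- Pre_ excludes lists with fewer than 2 points, on which A's areas[0] raises IndexError.
def Pre_part_1 (data : List (Int × Int)) : Prop := 2 ≤ data.length
instance (data : List (Int × Int)) : Decidable (Pre_part_1 data) := by unfold Pre_part_1; infer_instance
def pvWitness_part_1 : (List (Int × Int)) := [(0, 0), (2, 3)]

def Spec_part_1 (data : List (Int × Int)) (out : String) : Prop := out = part_1_alt data
instance (data : List (Int × Int)) (out : String) : Decidable (Spec_part_1 data out) := by unfold Spec_part_1; infer_instance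

-- ===== CLAIM (what is proved, stated in full; the proofs are below) =====
def Claim_equal_part_1 : Prop := ∀ (data : List (Int × Int)), Dom_part_1 data → Pre_part_1 data → Spec_part_1 data (part_1 data)
-- ===== LEMMAS AND PROOFS =====

-- A's outer-loop step and accumulator
def pvStepA (data : List (Int × Int)) (acc : List (Int × (Int × Int))) (ij : Int × (Int × Int)) :
    List (Int × (Int × Int)) :=
  PySem.List.sorted ((PySem.List.enumerate data).foldl (fun acc kl =>
    if ij.1 ≥ kl.1 then acc
    else acc ++ [(pvArea ij.2 kl.2, (ij.1, kl.1))]) acc) pvKey true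

def pvAreasA (data : List (Int × Int)) : List (Int × (Int × Int)) :=
  (PySem.List.enumerate data).foldl (pvStepA data) []

-- the pairs one outer iteration contributes, and the full canonical pair list
def pvG (data : List (Int × Int)) (ij : Int × (Int × Int)) : List (Int × (Int × Int)) :=
  ((PySem.List.enumerate data).filter (fun kl => decide (ij.1 < kl.1))).map
    (fun kl => (pvArea ij.2 kl.2, (ij.1, kl.1)))

def pvPairs (data : List (Int × Int)) : List (Int × (Int × Int)) :=
  (PySem.List.enumerate data).flatMap (pvG data)

-- B's running-max step and the list of pair areas B traverses
def pvStep (b : Option Int) (a : Int) : Option Int :=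
  match b with
  | none => some a
  | some m => if a > m then some a else b

def pvBList (data : List (Int × Int)) : List Int :=
  (PySem.List.enumerate data).flatMap (fun ip =>
    (PySem.List.slice data (some (ip.1 + 1)) none).map (fun q => pvArea ip.2 q))

lemma part_1_eq (data : List (Int × Int)) :
    part_1 data = match PySem.List.pyGet? (pvAreasA data) 0 with
      | some t => PySem.Int.toStr t.1
      | none => "" := rfl

-- A's inner loop appends exactly the filtered, mapped pairs
lemma inner_append (i : Int) (f : Int × (Int × Int) → Int × (Int × Int)) :
    ∀ (l : List (Int × (Int × Int))) (acc : List (Int × (Int × Int))),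
      l.foldl (fun acc kl => if i ≥ kl.1 then acc else acc ++ [f kl]) acc
        = acc ++ (l.filter (fun kl => decide (i < kl.1))).map f := by
  intro l
  induction l with
  | nil => intro acc; simp
  | cons x xs ih =>
    intro acc
    by_cases h : i ≥ x.1
    · simp [List.foldl_cons, h, ih, not_lt_of_ge h]
    · simp only [List.foldl_cons, if_neg h, ih, List.filter_cons]
      rw [if_pos (by simpa using lt_of_not_ge h)]
      simp

-- A's outer loop: the accumulator stays a permutation of the pairs contributed so far
lemma outer_perm (g : Int × (Int × Int) → List (Int × (Int × Int)))
    (step : List (Int × (Int × Int)) → Int × (Int × Int) → List (Int × (Int × Int)))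
    (hstep : ∀ acc o, (step acc o).Perm (acc ++ g o)) :
    ∀ (os : List (Int × (Int × Int))) (acc : List (Int × (Int × Int))),
      (os.foldl step acc).Perm (acc ++ os.flatMap g) := by
  intro os
  induction os with
  | nil => intro acc; simp
  | cons o os ih =>
    intro acc
    simp only [List.foldl_cons, List.flatMap_cons]
    refine (ih (step acc o)).trans ?_
    rw [← List.append_assoc]
    exact (hstep acc o).append_right _

-- A's outer loop keeps the accumulator sorted in descending key order
lemma outer_pairwise
    (step : List (Int × (Int × Int)) → Int × (Int × Int) → List (Int × (Int × Int)))
    (hstep : ∀ acc o, (step acc o).Pairwise (fun a b => pvKey b ≤ pvKey a)) :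
    ∀ (os : List (Int × (Int × Int))) (acc : List (Int × (Int × Int))),
      acc.Pairwise (fun a b => pvKey b ≤ pvKey a) →
      (os.foldl step acc).Pairwise (fun a b => pvKey b ≤ pvKey a) := by
  intro os
  induction os with
  | nil => intro acc h; simpa using h
  | cons o os ih => intro acc h; exact ih _ (hstep acc o)

lemma areasA_perm (data : List (Int × Int)) : (pvAreasA data).Perm (pvPairs data) := by
  have h := outer_perm (pvG data) (pvStepA data)
    (fun acc o => by
      unfold pvStepA pvG
      refine (PySem.List.sorted_perm _ _ _).trans ?_
      rw [inner_append]) (PySem.List.enumerate data) []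
  simpa [pvAreasA, pvPairs] using h

lemma areasA_pairwise (data : List (Int × Int)) :
    (pvAreasA data).Pairwise (fun a b => pvKey b ≤ pvKey a) :=
  outer_pairwise (pvStepA data)
    (fun _ _ => PySem.List.sorted_pairwise_rev _ _) (PySem.List.enumerate data) [] (by simp)

-- keys ordered lexicographically: the first component follows
lemma key_le_fst {y m : Int × (Int × Int)} (h : pvKey y ≤ pvKey m) : y.1 ≤ m.1 := by
  unfold pvKey at h
  rcases Prod.Lex.le_iff.mp h with h' | ⟨h', _⟩
  · exact le_of_lt h'
  · exact le_of_eq h'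

-- filtering enumerate by "index > i" and dropping the counters is a drop
lemma filt_drop : ∀ (xs : List (Int × Int)) (s i : Int),
    ((PySem.List.enumerate xs s).filter (fun kl => decide (i < kl.1))).map Prod.snd
      = xs.drop (i - s + 1).toNat := by
  intro xs
  induction xs with
  | nil => intro s i; simp [PySem.List.enumerate]
  | cons x xs ih =>
    intro s i
    rw [PySem.List.enumerate_cons, List.filter_cons]
    by_cases h : i < s
    · rw [if_pos (by simpa using h)]
      have h0 : (i - s + 1).toNat = 0 := by omega
      have h1 : (i - (s + 1) + 1).toNat = 0 := by omega
      simp only [List.map_cons, ih (s + 1) i, h0, h1, List.drop_zero]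
    · rw [if_neg (by simpa using h)]
      rw [ih (s + 1) i]
      have : (i - s + 1).toNat = (i - (s + 1) + 1).toNat + 1 := by omega
      rw [this, List.drop_succ_cons]

-- B traverses exactly the areas of A's pair list, in some order
lemma bl_eq (data : List (Int × Int)) : pvBList data = (pvPairs data).map Prod.fst := by
  unfold pvBList pvPairs
  rw [List.map_flatMap]
  refine List.flatMap_congr ?_
  intro ip hip
  obtain ⟨k, hk, hip_eq⟩ := (PySem.List.mem_enumerate_iff _ _ _).mp hip
  have hnn : 0 ≤ ip.1 := by rw [hip_eq]; simp
  rw [PySem.List.slice_from _ (by omega : (0:Int) ≤ ip.1 + 1)]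
  unfold pvG
  have hd := filt_drop data 0 ip.1
  have harg : (ip.1 - 0 + 1).toNat = (ip.1 + 1).toNat := by omega
  rw [harg] at hd
  rw [← hd]
  simp [List.map_map, Function.comp]

-- the running-max fold: value, membership, upper bound
lemma step_spec : ∀ (l : List Int) (m : Int),
    ∃ M, l.foldl pvStep (some m) = some M ∧ m ≤ M ∧ (M = m ∨ M ∈ l) ∧ ∀ a ∈ l, a ≤ M := by
  intro l
  induction l with
  | nil => intro m; exact ⟨m, rfl, le_refl m, Or.inl rfl, by simp⟩
  | cons a l ih =>
    intro m
    simp only [List.foldl_cons]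
    by_cases h : a > m
    · rw [show pvStep (some m) a = some a from by simp [pvStep, h]]
      obtain ⟨M, h1, h2, h3, h4⟩ := ih a
      refine ⟨M, h1, by omega, ?_, ?_⟩
      · rcases h3 with h3 | h3 <;> simp [h3]
      · intro x hx
        rcases List.mem_cons.mp hx with hx | hx
        · omega
        · exact h4 _ hx
    · rw [show pvStep (some m) a = some m from by simp [pvStep, h]]
      obtain ⟨M, h1, h2, h3, h4⟩ := ih m
      refine ⟨M, h1, h2, ?_, ?_⟩
      · rcases h3 with h3 | h3 <;> simp [h3]
      · intro x hx
        rcases List.mem_cons.mp hx with hx | hx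
        · omega
        · exact h4 _ hx

lemma part_1_alt_eq (data : List (Int × Int)) :
    part_1_alt data = match (pvBList data).foldl pvStep none with
      | none => "None"
      | some m => PySem.Int.toStr m := by
  unfold part_1_alt pvBList
  have hstep : (fun (best : Option Int) (ip : Int × (Int × Int)) =>
      (PySem.List.slice data (some (ip.1 + 1)) none).foldl (fun best q =>
        let a := (|q.1 - ip.2.1| + 1) * (|q.2 - ip.2.2| + 1)
        match best with
        | none => some a
        | some m => if a > m then some a else best) best)
      = (fun (best : Option Int) (ip : Int × (Int × Int)) =>
      ((PySem.List.slice data (some (ip.1 + 1)) none).map (fun q => pvArea ip.2 q)).foldl pvStep best) := by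
    funext b ip
    rw [List.foldl_map]
    rfl
  rw [hstep, ← List.foldl_flatMap]

-- with at least two points, B's area list is nonempty
lemma blist_ne (data : List (Int × Int)) (h : 2 ≤ data.length) : pvBList data ≠ [] := by
  match data, h with
  | p :: q :: r, _ =>
    unfold pvBList
    rw [PySem.List.enumerate_cons, List.flatMap_cons]
    have h1 : PySem.List.slice (p :: q :: r) (some (((0:Int), p).1 + 1)) none
        = List.drop 1 (p :: q :: r) := by
      rw [PySem.List.slice_from _ (by norm_num)]
      norm_num
    rw [h1]
    simp

-- ===== VERDICT (by name: the statement is the Claim_ definition above) =====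
theorem part_1_spec : Claim_equal_part_1 := by
  intro data _ hpre
  unfold Spec_part_1
  unfold Pre_part_1 at hpre
  rw [part_1_eq, part_1_alt_eq]
  -- B side: the running maximum M of pvBList
  obtain ⟨a, l', hbl⟩ : ∃ a l', pvBList data = a :: l' := by
    cases hb : pvBList data with
    | nil => exact absurd hb (blist_ne data hpre)
    | cons a l' => exact ⟨a, l', rfl⟩
  obtain ⟨M, hM, haM, hmemM, hubM⟩ := step_spec l' a
  have hfold : (pvBList data).foldl pvStep none = some M := by
    rw [hbl, List.foldl_cons, show pvStep none a = some a from rfl, hM]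
  have hMmem : M ∈ pvBList data := by
    rw [hbl]; rcases hmemM with h | h
    · simp [h]
    · exact List.mem_cons_of_mem _ h
  have hMub : ∀ x ∈ pvBList data, x ≤ M := by
    rw [hbl]; intro x hx
    rcases List.mem_cons.mp hx with hx | hx
    · omega
    · exact hubM _ hx
  -- A side: the head m of the (descending) sorted accumulator
  have hperm := areasA_perm data
  have hpair := areasA_pairwise data
  obtain ⟨m, t, hAe⟩ : ∃ m t, pvAreasA data = m :: t := by
    cases hA : pvAreasA data with
    | nil =>
      exfalso
      have : pvPairs data = [] := by
        have := hperm.length_eq; rw [hA] at this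
        exact List.eq_nil_of_length_eq_zero this.symm
      have : pvBList data = [] := by rw [bl_eq, this]; rfl
      exact blist_ne data hpre this
    | cons m t => exact ⟨m, t, rfl⟩
  have hget : PySem.List.pyGet? (pvAreasA data) 0 = some m := by
    rw [hAe]; simp [PySem.List.pyGet?, PySem.List.pyIdx?]
  have hkey : ∀ y ∈ pvPairs data, pvKey y ≤ pvKey m := by
    intro y hy
    have hy' : y ∈ pvAreasA data := hperm.mem_iff.mpr hy
    rw [hAe] at hy'
    rcases List.mem_cons.mp hy' with rfl | hy'
    · exact le_refl _
    · rw [hAe] at hpair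
      exact (List.pairwise_cons.mp hpair).1 y hy'
  have hmP : m ∈ pvPairs data := hperm.subset (by rw [hAe]; exact List.mem_cons_self)
  -- the two results are the same integer
  have hm1 : m.1 ∈ pvBList data := by
    rw [bl_eq]; exact List.mem_map_of_mem hmP
  have hle : m.1 ≤ M := hMub _ hm1
  have hge : M ≤ m.1 := by
    rw [bl_eq] at hMmem
    obtain ⟨y, hyP, hy1⟩ := List.mem_map.mp hMmem
    rw [← hy1]
    exact key_le_fst (hkey y hyP)
  have : M = m.1 := le_antisymm hge hle
  rw [hget, hfold, this]
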